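-- pv_equiv track=rewrite | github.com/stefsiekman/aoc2019 | 03/first.py | closest_crossing
-- ===== SOURCE A (Python) =====
-- def distance(p):
--     return abs(p[0]) + abs(p[1])
--
-- def closest_crossing(visited):
--     closest_distance = None
--     closest_position = None
--     for pos in visited[0]:
--         if pos in visited[1]:
--             dist = distance(pos)
--             if closest_distance is None or closest_distance > dist:
--                 closest_distance = dist
--                 closest_position = pos
--
--     return closest_position
-- ===== SOURCE B (Python) =====
-- def distance(p):
--     return abs(p[0]) + abs(p[1])
--
-- def closest_crossing(visited):
--     # sort the crossings by Manhattan distance (stable), then take the first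
--     second = set(visited[1])
--     ordered = sorted((p for p in visited[0] if p in second), key=distance)
--     return ordered[0] if ordered else None
-- ===== Notes on version B (the rewrite author's own statement) =====
-- stated objective: alternative
-- what changed: Replaces A's fused minimum-tracking loop (two Optional state variables and an inner list-membership scan of visited[1]) by a sort-based selection: collect the crossings via a set of visited[1], stably sort them by Manhattan distance, and return the first element of the sorted list (stability reproduces A's first-at-minimum tie-break).
-- outside the precondition, e.g. on closest_crossing([[]]): A returns None, B raises IndexError; on closest_crossing([]): A raises IndexError, B raises IndexError
import Mathlib
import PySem

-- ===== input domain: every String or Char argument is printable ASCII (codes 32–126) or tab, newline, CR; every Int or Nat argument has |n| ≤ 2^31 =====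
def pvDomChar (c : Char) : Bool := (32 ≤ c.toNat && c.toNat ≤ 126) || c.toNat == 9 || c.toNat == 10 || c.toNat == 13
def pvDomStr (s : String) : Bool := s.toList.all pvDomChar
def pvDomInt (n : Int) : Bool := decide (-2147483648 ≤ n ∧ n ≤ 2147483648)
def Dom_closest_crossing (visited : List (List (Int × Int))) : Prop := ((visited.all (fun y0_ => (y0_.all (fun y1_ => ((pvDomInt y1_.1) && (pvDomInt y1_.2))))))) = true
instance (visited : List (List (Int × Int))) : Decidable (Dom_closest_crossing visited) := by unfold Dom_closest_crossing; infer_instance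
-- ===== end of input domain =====

-- B replaces A's fused minimum-tracking loop by collecting the crossings, stably sorting them
-- by Manhattan distance and returning the head of the sorted list (objective: alternative).

-- ===== PORT A =====
def pvDistance (p : Int × Int) : Int := |p.1| + |p.2|

def closest_crossing (visited : List (List (Int × Int))) : Option (Int × Int) :=
  -- under Pre_ (two wires present) visited[0] / visited[1] do not raise
  let w0 := PySem.List.pyGetD visited 0 []
  let w1 := PySem.List.pyGetD visited 1 []
  let st := w0.foldl
    (fun (acc : Option Int × Option (Int × Int)) pos =>
      if pos ∈ w1 then
        let dist := pvDistance pos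
        match acc.1 with
        | none => (some dist, some pos)
        | some cd => if cd > dist then (some dist, some pos) else acc
      else acc)
    (none, none)
  st.2

-- ===== PORT B =====
def closest_crossing_alt (visited : List (List (Int × Int))) : Option (Int × Int) :=
  let second : PySem.Set (Int × Int) := PySem.Set.ofList (PySem.List.pyGetD visited 1 [])
  let ordered := PySem.List.sorted
    ((PySem.List.pyGetD visited 0 []).filter (fun p => decide (p ∈ second))) pvDistance false
  match ordered with
  | [] => none
  | x :: _ => some x

-- ===== PRECONDITION & SPEC =====
-- Pre_ excludes inputs with fewer than two wire lists, where both programs raise IndexError on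
-- visited[0]/visited[1] — except the degenerate visited = [[]], where A's loop body never runs so A
-- returns None while B's unconditional visited[1] access raises (see claim cites).
def Pre_closest_crossing (visited : List (List (Int × Int))) : Prop := 2 ≤ visited.length
instance (visited : List (List (Int × Int))) : Decidable (Pre_closest_crossing visited) := by unfold Pre_closest_crossing; infer_instance
def pvWitness_closest_crossing : (List (List (Int × Int))) := [[(3, 0), (1, 1)], [(1, 1), (3, 0)]]

def Spec_closest_crossing (visited : List (List (Int × Int))) (out : Option (Int × Int)) : Prop := out = closest_crossing_alt visited
instance (visited : List (List (Int × Int))) (out : Option (Int × Int)) : Decidable (Spec_closest_crossing visited out) := by unfold Spec_closest_crossing; infer_instance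

-- ===== CLAIM (what is proved, stated in full; the proofs are below) =====
def Claim_equal_closest_crossing : Prop := ∀ (visited : List (List (Int × Int))), Dom_closest_crossing visited → Pre_closest_crossing visited → Spec_closest_crossing visited (closest_crossing visited)

-- ===== LEMMAS AND PROOFS =====

-- The running first-minimum step, shared shape of both characterisations.
def pvMinStep (o : Option (Int × Int)) (x : Int × Int) : Option (Int × Int) :=
  match o with
  | none => some x
  | some m => if pvDistance x < pvDistance m then some x else some m

-- A's loop over l, started with best-so-far p (paired with its cached distance), returns in its
-- second component the running-first-minimum fold over the crossings of l started from p.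
theorem pvLoop_eq (w1 : List (Int × Int)) (l : List (Int × Int)) (p : Option (Int × Int)) :
    (l.foldl
      (fun (acc : Option Int × Option (Int × Int)) pos =>
        if pos ∈ w1 then
          let dist := pvDistance pos
          match acc.1 with
          | none => (some dist, some pos)
          | some cd => if cd > dist then (some dist, some pos) else acc
        else acc)
      (p.map pvDistance, p)).2
    = (l.filter (fun x => decide (x ∈ w1))).foldl pvMinStep p := by
  induction l generalizing p with
  | nil => rfl
  | cons x t ih =>
    by_cases hx : x ∈ w1
    · cases p with
      | none =>
        simpa [hx, pvMinStep] using ih (some x)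
      | some m =>
        by_cases hlt : pvDistance x < pvDistance m
        · simpa [hx, hlt, pvMinStep] using ih (some x)
        · simpa [hx, hlt, not_lt.mp hlt, pvMinStep] using ih (some m)
    · simpa [hx] using ih p

-- head? of a stable insertion: x wins iff it beats the current head (no sortedness needed).
theorem pvHead_insertBy (x : Int × Int) (ys : List (Int × Int)) :
    (PySem.List.insertBy (fun a b => decide (pvDistance a < pvDistance b)) x ys).head?
      = pvMinStep ys.head? x := by
  cases ys with
  | nil => rfl
  | cons a t =>
    by_cases h : pvDistance x < pvDistance a
    · simp [PySem.List.insertBy, h, pvMinStep]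
    · simp [PySem.List.insertBy, h, pvMinStep]

-- head? of the insertion-sort fold IS the running-first-minimum fold.
theorem pvHead_foldl_ins (l : List (Int × Int)) (acc : List (Int × Int)) :
    (l.foldl (fun acc x => PySem.List.insertBy (fun a b => decide (pvDistance a < pvDistance b)) x acc) acc).head?
      = l.foldl pvMinStep acc.head? := by
  induction l generalizing acc with
  | nil => rfl
  | cons x t ih =>
    simp only [List.foldl_cons]
    rw [ih, pvHead_insertBy]

theorem closest_eq (visited : List (List (Int × Int))) :
    closest_crossing visited = closest_crossing_alt visited := by
  unfold closest_crossing closest_crossing_alt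
  dsimp only
  have hset : ((PySem.List.pyGetD visited 0 []).filter
        (fun p => decide (p ∈ PySem.Set.ofList (PySem.List.pyGetD visited 1 []))))
      = ((PySem.List.pyGetD visited 0 []).filter
        (fun x => decide (x ∈ PySem.List.pyGetD visited 1 []))) := by
    apply List.filter_congr
    intro x _
    simp [PySem.Set.mem_ofList]
  rw [hset, PySem.List.sorted_eq_foldl_insertBy]
  have hhead := pvHead_foldl_ins
    ((PySem.List.pyGetD visited 0 []).filter
      (fun x => decide (x ∈ PySem.List.pyGetD visited 1 []))) []
  have hloop := pvLoop_eq (PySem.List.pyGetD visited 1 [])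
      (PySem.List.pyGetD visited 0 []) none
  simp only [Option.map_none] at hloop
  rw [hloop]
  simp only [List.head?] at hhead
  rw [← hhead]
  cases (((PySem.List.pyGetD visited 0 []).filter
      (fun x => decide (x ∈ PySem.List.pyGetD visited 1 []))).foldl
      (fun acc x => PySem.List.insertBy (fun a b => decide (pvDistance a < pvDistance b)) x acc) []) <;> rfl

-- ===== VERDICT (by name: the statement is the Claim_ definition above) =====
theorem closest_crossing_spec : Claim_equal_closest_crossing := by
  intro visited _ _
  unfold Spec_closest_crossing
  exact closest_eq visited
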